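-- pv_equiv track=rewrite | github.com/franchesoni/sam2 | ours/binary_merging.py | map_labels_to_refs
-- ===== SOURCE A (Python) =====
-- def map_labels_to_refs(refs, max_label):
--     """
--     Creates a mapping from labels to the refs that contain them.
--
--     Parameters:
--     - refs: list of sets of labels. Usually obtained from `reference_masks_as_sets`.
--     - max_label: Assume labels go from 1 to `max_label` inclusive.
--
--     Returns:
--     - dict mapping each label to a set of indices of refs that contain that label.
--     """
--     label_to_refs = {}
--     for label in range(1, max_label + 1):
--         label_to_refs[label] = set()
--         for i, ref in enumerate(refs):
--             if label in ref:
--                 label_to_refs[label].add(i)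
--     return label_to_refs
-- ===== SOURCE B (Python) =====
-- def map_labels_to_refs(refs, max_label):
--     """Inverted iteration: pre-create an empty set for every label, then walk
--     each ref once and append its index to the sets of the labels it contains."""
--     label_to_refs = {label: set() for label in range(1, max_label + 1)}
--     for i, ref in enumerate(refs):
--         for label in ref:
--             if 1 <= label <= max_label:
--                 label_to_refs[label].add(i)
--     return label_to_refs
-- ===== Notes on version B (the rewrite author's own statement) =====
-- stated objective: faster
-- what changed: Instead of scanning every ref for every label in 1..max_label, B pre-initializes an empty set per label and makes a single pass over the refs, appending each ref's index to the sets of the labels it actually contains.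
import Mathlib
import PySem

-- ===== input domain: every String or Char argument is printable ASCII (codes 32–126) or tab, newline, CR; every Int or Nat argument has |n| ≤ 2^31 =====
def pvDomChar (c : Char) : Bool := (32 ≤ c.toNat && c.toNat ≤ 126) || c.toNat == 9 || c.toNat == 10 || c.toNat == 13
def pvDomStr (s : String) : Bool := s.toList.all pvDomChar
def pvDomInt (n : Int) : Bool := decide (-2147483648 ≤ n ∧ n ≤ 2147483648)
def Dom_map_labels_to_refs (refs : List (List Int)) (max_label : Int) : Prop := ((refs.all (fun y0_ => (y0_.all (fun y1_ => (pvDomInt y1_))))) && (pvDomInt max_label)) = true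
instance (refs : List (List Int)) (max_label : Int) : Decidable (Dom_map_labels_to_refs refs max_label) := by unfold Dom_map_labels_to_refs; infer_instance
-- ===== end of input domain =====

-- B inverts A's iteration: instead of scanning every ref for every label in 1..max_label, it
-- pre-creates an empty set per label and walks each ref once, adding the ref's index for each
-- contained label; proved to return the same dict (objective: faster, measured by the check).


-- ===== PORT A =====
-- label_to_refs = {}; for label in range(1, max_label+1): label_to_refs[label] = set();
--   for i, ref in enumerate(refs): if label in ref: label_to_refs[label].add(i)
def map_labels_to_refs (refs : List (List Int)) (max_label : Int) : List (Int × List Int) :=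
  PySem.Dict.items <|
    (PySem.List.pyRange 1 (max_label + 1)).foldl
      (fun d label =>
        (PySem.List.enumerate refs 0).foldl
          (fun d p =>
            if PySem.Set.contains p.2 label then
              d.modify label PySem.Set.empty (fun s => PySem.Set.add s p.1)
            else d)
          (d.insert label PySem.Set.empty))
      PySem.Dict.empty

-- ===== PORT B =====
-- label_to_refs = {label: set() for label in range(1, max_label+1)};
--   for i, ref in enumerate(refs): for label in ref: if 1 <= label <= max_label: label_to_refs[label].add(i)
def map_labels_to_refs_alt (refs : List (List Int)) (max_label : Int) : List (Int × List Int) :=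
  PySem.Dict.items <|
    (PySem.List.enumerate refs 0).foldl
      (fun d p =>
        p.2.foldl
          (fun d label =>
            if 1 ≤ label ∧ label ≤ max_label then
              d.modify label PySem.Set.empty (fun s => PySem.Set.add s p.1)
            else d)
          d)
      ((PySem.List.pyRange 1 (max_label + 1)).foldl
        (fun d label => d.insert label PySem.Set.empty) PySem.Dict.empty)

-- ===== PRECONDITION & SPEC =====
def Spec_map_labels_to_refs (refs : List (List Int)) (max_label : Int) (out : List (Int × List Int)) : Prop := out = map_labels_to_refs_alt refs max_label
instance (refs : List (List Int)) (max_label : Int) (out : List (Int × List Int)) : Decidable (Spec_map_labels_to_refs refs max_label out) := by unfold Spec_map_labels_to_refs; infer_instance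

-- ===== CLAIM (what is proved, stated in full; the proofs are below) =====
def Claim_equal_map_labels_to_refs : Prop := ∀ (refs : List (List Int)) (max_label : Int), Dom_map_labels_to_refs refs max_label → Spec_map_labels_to_refs refs max_label (map_labels_to_refs refs max_label)

-- ===== LEMMAS AND PROOFS =====

def pvVal (refs : List (List Int)) (label : Int) : PySem.Set Int :=
  (PySem.List.enumerate refs 0).foldl
    (fun v p => if PySem.Set.contains p.2 label then PySem.Set.add v p.1 else v) []

-- pyRange a b has no duplicates
lemma pv_nodup_pyRange (a b : Int) : (PySem.List.pyRange a b).Nodup := by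
  by_cases h : a < b
  · rw [PySem.List.pyRange_one_cons h]
    refine List.nodup_cons.mpr ⟨?_, pv_nodup_pyRange (a+1) b⟩
    rw [PySem.List.mem_pyRange_one]; omega
  · have : PySem.List.pyRange a b = [] := by
      refine List.eq_nil_iff_forall_not_mem.mpr (fun x hx => ?_)
      rw [PySem.List.mem_pyRange_one] at hx; omega
    simp [this]
termination_by (b - a).toNat
decreasing_by omega

lemma pv_keys_insert_add {d : PySem.Dict Int (PySem.Set Int)} (l : Int) (v : PySem.Set Int) :
    (d.insert l v).keys = PySem.Set.add d.keys l := by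
  by_cases h : d.contains l = true
  · rw [PySem.Dict.keys_insert_of_contains d v h,
      PySem.Set.add_of_mem ((PySem.Dict.contains_iff_mem_keys d l).mp h)]
  · rw [PySem.Dict.keys_insert_of_not_contains d v (by simpa using h),
      PySem.Set.add_of_not_mem]
    intro hm; exact h ((PySem.Dict.contains_iff_mem_keys d l).mpr hm)

-- ===== A side =====
lemma pvA_inner_getD (en : List (Int × List Int)) (label : Int)
    (d : PySem.Dict Int (PySem.Set Int)) (k : Int) :
    (en.foldl (fun d p => if PySem.Set.contains p.2 label then
        d.modify label PySem.Set.empty (fun s => PySem.Set.add s p.1) else d) d).getD k PySem.Set.empty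
    = if k = label then
        en.foldl (fun v p => if PySem.Set.contains p.2 label then PySem.Set.add v p.1 else v)
          (d.getD label PySem.Set.empty)
      else d.getD k PySem.Set.empty := by
  induction en generalizing d with
  | nil =>
    simp only [List.foldl_nil]
    by_cases hk : k = label <;> simp [hk]
  | cons p t ih =>
    simp only [List.foldl_cons]
    by_cases hc : PySem.Set.contains p.2 label = true
    · rw [if_pos hc, ih]
      by_cases hk : k = label
      · subst hk
        rw [if_pos rfl, if_pos rfl, if_pos hc, PySem.Dict.getD_modify, if_pos rfl]
      · rw [if_neg hk, if_neg hk, PySem.Dict.getD_modify, if_neg hk]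
    · rw [if_neg hc, ih, if_neg hc]

lemma pvA_inner_keys (en : List (Int × List Int)) (label : Int)
    (d : PySem.Dict Int (PySem.Set Int)) (hd : d.contains label = true) :
    (en.foldl (fun d p => if PySem.Set.contains p.2 label then
        d.modify label PySem.Set.empty (fun s => PySem.Set.add s p.1) else d) d).keys = d.keys := by
  induction en generalizing d with
  | nil => rfl
  | cons p t ih =>
    simp only [List.foldl_cons]
    by_cases hc : PySem.Set.contains p.2 label
    · have hk : (d.modify label PySem.Set.empty (fun s => PySem.Set.add s p.1)).keys = d.keys := by
        rw [PySem.Dict.keys_modify, PySem.Dict.keys_insert_of_contains _ _ hd]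
      have hc' : (d.modify label PySem.Set.empty (fun s => PySem.Set.add s p.1)).contains label = true := by
        rw [PySem.Dict.contains_iff_mem_keys, hk, ← PySem.Dict.contains_iff_mem_keys]; exact hd
      simp only [hc, if_true, ih _ hc', hk]
    · rw [if_neg hc, ih _ hd]

def pvStepA (refs : List (List Int)) (d : PySem.Dict Int (PySem.Set Int)) (label : Int) :
    PySem.Dict Int (PySem.Set Int) :=
  (PySem.List.enumerate refs 0).foldl
    (fun d p => if PySem.Set.contains p.2 label then
      d.modify label PySem.Set.empty (fun s => PySem.Set.add s p.1) else d)
    (d.insert label PySem.Set.empty)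

lemma pvA_outer_getD (refs : List (List Int)) (L : List Int)
    (d : PySem.Dict Int (PySem.Set Int)) (k : Int) :
    (L.foldl (pvStepA refs) d).getD k PySem.Set.empty
    = if k ∈ L then pvVal refs k else d.getD k PySem.Set.empty := by
  induction L generalizing d with
  | nil => simp
  | cons l t ih =>
    simp only [List.foldl_cons, ih]
    have hstep : (pvStepA refs d l).getD k PySem.Set.empty
        = if k = l then pvVal refs k else d.getD k PySem.Set.empty := by
      unfold pvStepA
      rw [pvA_inner_getD]
      by_cases hk : k = l
      · subst hk; simp [pvVal]
      · simp [hk, PySem.Dict.getD_insert]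
    rw [hstep]
    by_cases h1 : k ∈ t <;> by_cases h2 : k = l <;> simp [h1, h2]

lemma pvA_outer_keys (refs : List (List Int)) (L : List Int)
    (d : PySem.Dict Int (PySem.Set Int)) :
    (L.foldl (pvStepA refs) d).keys = PySem.Set.update d.keys L := by
  induction L generalizing d with
  | nil => simp [PySem.Set.update_nil]
  | cons l t ih =>
    simp only [List.foldl_cons, ih, PySem.Set.update_cons]
    congr 1
    unfold pvStepA
    rw [pvA_inner_keys, pv_keys_insert_add]
    exact PySem.Dict.contains_insert_self d l PySem.Set.empty

-- ===== B side =====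
lemma pvB_inner_getD (m i : Int) (ref : List Int)
    (d : PySem.Dict Int (PySem.Set Int)) (k : Int) :
    (ref.foldl (fun d label => if 1 ≤ label ∧ label ≤ m then
        d.modify label PySem.Set.empty (fun s => PySem.Set.add s i) else d) d).getD k PySem.Set.empty
    = if k ∈ ref ∧ 1 ≤ k ∧ k ≤ m then PySem.Set.add (d.getD k PySem.Set.empty) i
      else d.getD k PySem.Set.empty := by
  induction ref generalizing d with
  | nil => simp
  | cons l t ih =>
    simp only [List.foldl_cons]
    by_cases hb : 1 ≤ l ∧ l ≤ m
    · rw [if_pos hb, ih, PySem.Dict.getD_modify]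
      by_cases hk : k = l
      · subst hk
        by_cases ht : k ∈ t <;> simp [ht, hb]
      · by_cases ht : k ∈ t <;> simp [ht, hk]
    · rw [if_neg hb, ih]
      by_cases hk : k = l
      · subst hk; simp [hb]
      · simp [hk]

lemma pvB_inner_keys (m i : Int) (ref : List Int)
    (d : PySem.Dict Int (PySem.Set Int)) (hd : ∀ l : Int, 1 ≤ l ∧ l ≤ m → d.contains l = true) :
    (ref.foldl (fun d label => if 1 ≤ label ∧ label ≤ m then
        d.modify label PySem.Set.empty (fun s => PySem.Set.add s i) else d) d).keys = d.keys := by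
  induction ref generalizing d with
  | nil => rfl
  | cons l t ih =>
    simp only [List.foldl_cons]
    by_cases hb : 1 ≤ l ∧ l ≤ m
    · have hk : (d.modify l PySem.Set.empty (fun s => PySem.Set.add s i)).keys = d.keys := by
        rw [PySem.Dict.keys_modify, PySem.Dict.keys_insert_of_contains _ _ (hd l hb)]
      have hd' : ∀ l' : Int, 1 ≤ l' ∧ l' ≤ m →
          (d.modify l PySem.Set.empty (fun s => PySem.Set.add s i)).contains l' = true := by
        intro l' hb'
        rw [PySem.Dict.contains_iff_mem_keys, hk, ← PySem.Dict.contains_iff_mem_keys]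
        exact hd l' hb'
      rw [if_pos hb, ih _ hd', hk]
    · rw [if_neg hb, ih _ hd]

def pvStepB (m : Int) (d : PySem.Dict Int (PySem.Set Int)) (p : Int × List Int) :
    PySem.Dict Int (PySem.Set Int) :=
  p.2.foldl (fun d label => if 1 ≤ label ∧ label ≤ m then
    d.modify label PySem.Set.empty (fun s => PySem.Set.add s p.1) else d) d

lemma pvB_outer_getD (m : Int) (en : List (Int × List Int))
    (d : PySem.Dict Int (PySem.Set Int)) (k : Int) :
    (en.foldl (pvStepB m) d).getD k PySem.Set.empty
    = en.foldl (fun v p => if k ∈ p.2 ∧ 1 ≤ k ∧ k ≤ m then PySem.Set.add v p.1 else v)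
        (d.getD k PySem.Set.empty) := by
  induction en generalizing d with
  | nil => rfl
  | cons p t ih =>
    simp only [List.foldl_cons, ih, pvStepB, pvB_inner_getD]

lemma pvB_outer_keys (m : Int) (en : List (Int × List Int))
    (d : PySem.Dict Int (PySem.Set Int)) (hd : ∀ l : Int, 1 ≤ l ∧ l ≤ m → d.contains l = true) :
    (en.foldl (pvStepB m) d).keys = d.keys := by
  induction en generalizing d with
  | nil => rfl
  | cons p t ih =>
    simp only [List.foldl_cons]
    have hk : (pvStepB m d p).keys = d.keys := pvB_inner_keys m p.1 p.2 d hd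
    have hd' : ∀ l : Int, 1 ≤ l ∧ l ≤ m → (pvStepB m d p).contains l = true := by
      intro l hb
      rw [PySem.Dict.contains_iff_mem_keys, hk, ← PySem.Dict.contains_iff_mem_keys]
      exact hd l hb
    rw [ih _ hd', hk]

-- init dict
lemma pvB_init_items (m : Int) :
    ((PySem.List.pyRange 1 (m + 1)).foldl
      (fun d label => d.insert label PySem.Set.empty) PySem.Dict.empty).items
    = (PySem.List.pyRange 1 (m + 1)).map (fun l => (l, (PySem.Set.empty : PySem.Set Int))) := by
  have := PySem.Dict.items_foldl_insert_fresh (PySem.List.pyRange 1 (m + 1))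
    (fun l => l) (fun _ => (PySem.Set.empty : PySem.Set Int)) PySem.Dict.empty
    (fun a _ => PySem.Dict.contains_empty a) (by simpa using pv_nodup_pyRange 1 (m+1))
  simpa using this

-- ===== VERDICT (by name: the statement is the Claim_ definition above) =====
theorem map_labels_to_refs_spec : Claim_equal_map_labels_to_refs := by
  intro refs m _
  show map_labels_to_refs refs m = map_labels_to_refs_alt refs m
  unfold map_labels_to_refs map_labels_to_refs_alt
  have hRnd : (PySem.List.pyRange 1 (m + 1)).Nodup := pv_nodup_pyRange 1 (m + 1)
  set R := PySem.List.pyRange 1 (m + 1) with hR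
  set d0 := R.foldl (fun d label => d.insert label PySem.Set.empty) PySem.Dict.empty with hd0
  change (R.foldl (pvStepA refs) PySem.Dict.empty).items
      = ((PySem.List.enumerate refs 0).foldl (pvStepB m) d0).items
  set dA := R.foldl (pvStepA refs) PySem.Dict.empty with hdA
  set dB := (PySem.List.enumerate refs 0).foldl (pvStepB m) d0 with hdB
  have d0items : d0.items = R.map (fun l => (l, (PySem.Set.empty : PySem.Set Int))) :=
    pvB_init_items m
  have d0keys : d0.keys = R := by
    simp [PySem.Dict.keys, d0items, Function.comp_def]
  have d0contains : ∀ l : Int, 1 ≤ l ∧ l ≤ m → d0.contains l = true := by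
    intro l hb
    rw [PySem.Dict.contains_iff_mem_keys, d0keys, hR, PySem.List.mem_pyRange_one]
    omega
  have d0getD : ∀ k : Int, d0.getD k PySem.Set.empty = PySem.Set.empty := by
    intro k
    by_cases hc : d0.contains k = true
    · have hk : k ∈ R := d0keys ▸ (PySem.Dict.contains_iff_mem_keys d0 k).mp hc
      exact PySem.Dict.getD_of_mem_items d0
        (by rw [d0items]; exact List.mem_map.mpr ⟨k, hk, rfl⟩) (d0keys ▸ hRnd) _
    · exact PySem.Dict.getD_of_not_contains d0 _ (by simpa using hc)
  have hAkeys : dA.keys = R := by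
    rw [hdA, pvA_outer_keys]
    rw [PySem.Dict.keys_empty, PySem.Set.update_nil_left, PySem.Set.ofList_eq_self_of_nodup R hRnd]
  have hBkeys : dB.keys = R := by
    rw [hdB, pvB_outer_keys m _ _ d0contains, d0keys]
  rw [PySem.Dict.items_eq_map_keys dA (hAkeys ▸ hRnd) PySem.Set.empty,
      PySem.Dict.items_eq_map_keys dB (hBkeys ▸ hRnd) PySem.Set.empty, hAkeys, hBkeys]
  refine List.map_congr_left (fun k hk => ?_)
  have hb : 1 ≤ k ∧ k ≤ m := by
    rw [hR, PySem.List.mem_pyRange_one] at hk; omega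
  have hA : dA.getD k PySem.Set.empty = pvVal refs k := by
    rw [hdA, pvA_outer_getD, if_pos hk]
  have hB : dB.getD k PySem.Set.empty = pvVal refs k := by
    rw [hdB, pvB_outer_getD, d0getD]
    unfold pvVal
    refine PySem.List.foldl_congr_mem _ _ _ _ (fun acc p _ => ?_)
    by_cases hp : k ∈ p.2 <;> simp [hp, hb]
  rw [hA, hB]
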